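-- pv_equiv track=rewrite | github.com/gusamaya/scamwatcher | analyzer.py | domains_align
-- ===== SOURCE A (Python) =====
-- def domains_align(sender_domain, target_domain):
--     if not sender_domain or not target_domain:
--         return False
--
--     sender_domain = sender_domain.lower().strip()
--     target_domain = target_domain.lower().strip()
--
--     if sender_domain.startswith("www."):
--         sender_domain = sender_domain[4:]
--     if target_domain.startswith("www."):
--         target_domain = target_domain[4:]
--
--     if sender_domain == target_domain:
--         return True
--
--     if target_domain.endswith("." + sender_domain):
--         return True
--
--     trusted_alias_map = {
--         "google.com": ["c.gle", "g.co", "googlemail.com", "googleapis.com", "withgoogle.com", "youtu.be", "youtube.com"],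
--         "facebook.com": ["fb.com", "fb.me", "meta.com", "messenger.com"],
--         "instagram.com": ["instagr.am", "meta.com"],
--         "amazon.com": ["amzn.to", "amazon.com.au"],
--         "youtube.com": ["youtu.be"],
--         "youtu.be": ["youtube.com"],
--     }
--
--     sender_aliases = trusted_alias_map.get(sender_domain, [])
--     if target_domain in sender_aliases:
--         return True
--
--     for canonical_domain, aliases in trusted_alias_map.items():
--         if sender_domain in aliases and target_domain == canonical_domain:
--             return True
--         if sender_domain in aliases and target_domain in aliases:
--             return True
--
--     return False
-- ===== SOURCE B (Python) =====
-- def _normalize(d):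
--     d = d.lower().strip()
--     return d[4:] if d[:4] == "www." else d
--
-- _GROUP_MEMBERS = [
--     (0, "google.com"), (0, "c.gle"), (0, "g.co"), (0, "googlemail.com"),
--     (0, "googleapis.com"), (0, "withgoogle.com"), (0, "youtu.be"), (0, "youtube.com"),
--     (1, "facebook.com"), (1, "fb.com"), (1, "fb.me"), (1, "meta.com"), (1, "messenger.com"),
--     (2, "instagram.com"), (2, "instagr.am"), (2, "meta.com"),
--     (3, "amazon.com"), (3, "amzn.to"), (3, "amazon.com.au"),
--     (4, "youtube.com"), (4, "youtu.be"),
-- ]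
--
-- def _group_ids(d):
--     return {gid for gid, dom in _GROUP_MEMBERS if dom == d}
--
-- def domains_align(sender_domain, target_domain):
--     if not sender_domain or not target_domain:
--         return False
--     s = _normalize(sender_domain)
--     t = _normalize(target_domain)
--     return s == t or t.endswith("." + s) or not _group_ids(s).isdisjoint(_group_ids(t))
-- ===== Notes on version B (the rewrite author's own statement) =====
-- stated objective: alternative
-- what changed: B replaces A's alias dict (get-lookup plus a loop with three asymmetric branch conditions) with a flat tagged list of (group-id, domain) pairs: each domain maps to the set of trusted-group ids containing it, and the domains align iff those id sets intersect; normalization and the early checks become helper functions and one boolean expression.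
import Mathlib
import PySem

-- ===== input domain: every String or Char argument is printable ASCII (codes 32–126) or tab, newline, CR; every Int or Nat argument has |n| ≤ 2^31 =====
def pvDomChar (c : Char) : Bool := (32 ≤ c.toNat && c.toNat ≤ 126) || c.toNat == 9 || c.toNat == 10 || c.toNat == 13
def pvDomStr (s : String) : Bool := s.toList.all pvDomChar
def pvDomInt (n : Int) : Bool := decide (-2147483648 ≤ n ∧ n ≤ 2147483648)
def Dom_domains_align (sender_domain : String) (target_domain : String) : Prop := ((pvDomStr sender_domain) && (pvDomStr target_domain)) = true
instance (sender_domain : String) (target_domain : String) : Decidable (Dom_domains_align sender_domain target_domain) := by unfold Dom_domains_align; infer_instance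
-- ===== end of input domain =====

-- B replaces A's asymmetric alias-dict logic with a flat tagged (group-id, domain) list and
-- an intersection test on group-id sets; objective: alternative (same cost, different structure).

-- ===== PORT A =====
-- trusted_alias_map of A, as a PySem.Dict literal
def daAliasMap : PySem.Dict (List Char) (List (List Char)) :=
  PySem.Dict.mk [
    ("google.com".toList, ["c.gle".toList, "g.co".toList, "googlemail.com".toList,
      "googleapis.com".toList, "withgoogle.com".toList, "youtu.be".toList, "youtube.com".toList]),
    ("facebook.com".toList, ["fb.com".toList, "fb.me".toList, "meta.com".toList, "messenger.com".toList]),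
    ("instagram.com".toList, ["instagr.am".toList, "meta.com".toList]),
    ("amazon.com".toList, ["amzn.to".toList, "amazon.com.au".toList]),
    ("youtube.com".toList, ["youtu.be".toList]),
    ("youtu.be".toList, ["youtube.com".toList])]

def domains_align (sender_domain : String) (target_domain : String) : Bool :=
  if sender_domain.toList.isEmpty || target_domain.toList.isEmpty then false
  else
    let s0 := PySem.Chars.strip (PySem.Chars.lower sender_domain.toList)
    let t0 := PySem.Chars.strip (PySem.Chars.lower target_domain.toList)
    let s := if PySem.Chars.startswith s0 "www.".toList then PySem.List.slice s0 (some 4) none else s0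
    let t := if PySem.Chars.startswith t0 "www.".toList then PySem.List.slice t0 (some 4) none else t0
    if s = t then true
    else if PySem.Chars.endswith t ('.' :: s) then true
    else
      let sender_aliases := daAliasMap.getD s []
      if sender_aliases.contains t then true
      else daAliasMap.items.any (fun p =>
        (p.2.contains s && (t == p.1)) || (p.2.contains s && p.2.contains t))

-- ===== PORT B =====
-- _normalize of B: lower+strip, then drop a leading "www." tested by slicing
def daNormalize (d : List Char) : List Char :=
  let d := PySem.Chars.strip (PySem.Chars.lower d)
  if PySem.List.slice d none (some 4) == "www.".toList then PySem.List.slice d (some 4) none else d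

-- _GROUP_MEMBERS of B: flat tagged list of (group id, member domain)
def daGroupMembers : List (Int × List Char) := [
  (0, "google.com".toList), (0, "c.gle".toList), (0, "g.co".toList), (0, "googlemail.com".toList),
  (0, "googleapis.com".toList), (0, "withgoogle.com".toList), (0, "youtu.be".toList), (0, "youtube.com".toList),
  (1, "facebook.com".toList), (1, "fb.com".toList), (1, "fb.me".toList), (1, "meta.com".toList), (1, "messenger.com".toList),
  (2, "instagram.com".toList), (2, "instagr.am".toList), (2, "meta.com".toList),
  (3, "amazon.com".toList), (3, "amzn.to".toList), (3, "amazon.com.au".toList),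
  (4, "youtube.com".toList), (4, "youtu.be".toList)]

-- _group_ids of B: {gid for gid, dom in _GROUP_MEMBERS if dom == d}
def daGroupIds (d : List Char) : PySem.Set Int :=
  PySem.Set.ofList ((daGroupMembers.filter (fun p => p.2 == d)).map Prod.fst)

def domains_align_alt (sender_domain : String) (target_domain : String) : Bool :=
  if sender_domain.toList.isEmpty || target_domain.toList.isEmpty then false
  else
    let s := daNormalize sender_domain.toList
    let t := daNormalize target_domain.toList
    (s == t) || PySem.Chars.endswith t ('.' :: s)
      || !(PySem.Set.isdisjoint (daGroupIds s) (daGroupIds t))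

-- ===== PRECONDITION & SPEC =====
def Spec_domains_align (sender_domain : String) (target_domain : String) (out : Bool) : Prop := out = domains_align_alt sender_domain target_domain
instance (sender_domain : String) (target_domain : String) (out : Bool) : Decidable (Spec_domains_align sender_domain target_domain out) := by unfold Spec_domains_align; infer_instance

-- ===== CLAIM (what is proved, stated in full; the proofs are below) =====
def Claim_equal_domains_align : Prop := ∀ (sender_domain : String) (target_domain : String), Dom_domains_align sender_domain target_domain → Spec_domains_align sender_domain target_domain (domains_align sender_domain target_domain)

-- ===== LEMMAS AND PROOFS =====

-- every domain string mentioned in A's alias map / B's member list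
def daAllDoms : List (List Char) :=
  ["google.com".toList, "c.gle".toList, "g.co".toList, "googlemail.com".toList,
   "googleapis.com".toList, "withgoogle.com".toList, "youtu.be".toList, "youtube.com".toList,
   "facebook.com".toList, "fb.com".toList, "fb.me".toList, "meta.com".toList, "messenger.com".toList,
   "instagram.com".toList, "instagr.am".toList, "amazon.com".toList, "amzn.to".toList, "amazon.com.au".toList]

-- A's and B's post-prologue alias logic, as functions of the normalized domains
def daTailA (s t : List Char) : Bool :=
  if (daAliasMap.getD s []).contains t then true
  else daAliasMap.items.any (fun p =>
    (p.2.contains s && (t == p.1)) || (p.2.contains s && p.2.contains t))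

def daTailB (s t : List Char) : Bool :=
  !(PySem.Set.isdisjoint (daGroupIds s) (daGroupIds t))

-- B's prefix test xs[:4] == "www." agrees with A's startswith
lemma daTake4_www (l : List Char) :
    ((PySem.List.slice l none (some 4) == "www.".toList) : Bool)
      = PySem.Chars.startswith l "www.".toList := by
  have h4 : PySem.List.slice l none (some (4:Int)) = l.take 4 := by
    simpa using PySem.List.slice_to l (by norm_num : (0:Int) ≤ 4)
  have hw : "www.".toList = ['w','w','w','.'] := by decide
  have hpre : "www.".toList <+: l ↔ l.take 4 = "www.".toList := by
    rw [List.prefix_iff_eq_take]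
    constructor
    · intro h; rw [hw] at h ⊢; simpa using h.symm
    · intro h; rw [hw] at h ⊢; simpa using h.symm
  rw [h4]
  by_cases hp : "www.".toList <+: l
  · rw [(PySem.Chars.startswith_iff _ _).mpr hp, beq_iff_eq.mpr (hpre.mp hp)]
  · have hsw : PySem.Chars.startswith l "www.".toList = false := by
      rw [Bool.eq_false_iff]; intro h; exact hp ((PySem.Chars.startswith_iff _ _).mp h)
    rw [hsw, beq_eq_false_iff_ne]
    intro h
    exact hp (hpre.mpr h)

-- B's _normalize computes A's normalized domain
lemma daNormalize_eq (d : List Char) :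
    daNormalize d
      = (if PySem.Chars.startswith (PySem.Chars.strip (PySem.Chars.lower d)) "www.".toList
          then PySem.List.slice (PySem.Chars.strip (PySem.Chars.lower d)) (some 4) none
          else PySem.Chars.strip (PySem.Chars.lower d)) := by
  simp only [daNormalize]
  rw [daTake4_www]

-- ground facts about the literal tables, checked at once by the kernel
lemma daItems_dom : ∀ p ∈ daAliasMap.items, p.1 ∈ daAllDoms ∧ ∀ y ∈ p.2, y ∈ daAllDoms := by decide

lemma daKeys_dom : ∀ k ∈ daAliasMap.keys, k ∈ daAllDoms := by decide

lemma daMembers_dom : ∀ p ∈ daGroupMembers, p.2 ∈ daAllDoms := by decide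

set_option maxHeartbeats 2000000 in
lemma daTail_eq_of_mem : ∀ s ∈ daAllDoms, ∀ t ∈ daAllDoms, s = t ∨ daTailA s t = daTailB s t := by
  decide

lemma mem_getD_dom (s x : List Char) (hx : x ∈ daAliasMap.getD s []) : x ∈ daAllDoms := by
  rw [PySem.Dict.getD_eq_get?_getD] at hx
  cases hget : daAliasMap.get? s with
  | none => rw [hget] at hx; simp at hx
  | some v =>
      rw [hget] at hx
      exact (daItems_dom (s, v) (PySem.Dict.mem_items_of_get?_eq_some _ hget)).2 x hx

lemma getD_key_dom (s : List Char) (h : daAliasMap.getD s [] ≠ []) : s ∈ daAllDoms := by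
  apply daKeys_dom
  by_contra hk
  have hnone : daAliasMap.get? s = none := (PySem.Dict.get?_eq_none_iff_not_mem_keys _ _).mpr hk
  rw [PySem.Dict.getD_eq_get?_getD, hnone] at h
  exact h rfl

lemma daTailA_false_of_not_mem (s t : List Char) (h : s ∉ daAllDoms ∨ t ∉ daAllDoms) :
    daTailA s t = false := by
  unfold daTailA
  have hcont : (daAliasMap.getD s []).contains t = false := by
    rw [Bool.eq_false_iff]
    intro hc
    have hmem : t ∈ daAliasMap.getD s [] := by simpa using hc
    rcases h with h | h
    · exact h (getD_key_dom s (by intro he; rw [he] at hmem; simp at hmem))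
    · exact h (mem_getD_dom s t hmem)
  rw [hcont]
  simp only [Bool.false_eq_true, if_false, List.any_eq_false]
  intro p hp hcond
  simp only [Bool.or_eq_true, Bool.and_eq_true, beq_iff_eq] at hcond
  have hs : s ∈ p.2 := by rcases hcond with ⟨h1, _⟩ | ⟨h1, _⟩ <;> exact List.mem_of_elem_eq_true h1
  have ht : t = p.1 ∨ t ∈ p.2 := by rcases hcond with ⟨_, h2⟩ | ⟨_, h2⟩ <;> [exact Or.inl h2; exact Or.inr (List.mem_of_elem_eq_true h2)]
  rcases h with h | h
  · exact h ((daItems_dom p hp).2 s hs)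
  · rcases ht with rfl | ht
    · exact h (daItems_dom p hp).1
    · exact h ((daItems_dom p hp).2 t ht)

lemma daGroupIds_nil_of_not_mem (s : List Char) (h : s ∉ daAllDoms) : daGroupIds s = [] := by
  unfold daGroupIds
  have : daGroupMembers.filter (fun p => p.2 == s) = [] := by
    rw [List.filter_eq_nil_iff]
    intro p hp hps
    exact h (beq_iff_eq.mp hps ▸ daMembers_dom p hp)
  rw [this]; rfl

lemma daTailB_false_of_not_mem (s t : List Char) (h : s ∉ daAllDoms ∨ t ∉ daAllDoms) :
    daTailB s t = false := by
  unfold daTailB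
  rw [Bool.not_eq_false']
  rw [PySem.Set.isdisjoint_iff]
  rcases h with h | h
  · rw [daGroupIds_nil_of_not_mem s h]; intro x hx; simp at hx
  · rw [daGroupIds_nil_of_not_mem t h]; intro x _ hx; simp at hx

lemma daTail_eq (s t : List Char) (hne : s ≠ t) : daTailA s t = daTailB s t := by
  by_cases hs : s ∈ daAllDoms
  · by_cases ht : t ∈ daAllDoms
    · rcases daTail_eq_of_mem s hs t ht with h | h
      · exact absurd h hne
      · exact h
    · rw [daTailA_false_of_not_mem s t (Or.inr ht), daTailB_false_of_not_mem s t (Or.inr ht)]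
  · rw [daTailA_false_of_not_mem s t (Or.inl hs), daTailB_false_of_not_mem s t (Or.inl hs)]

-- ===== VERDICT (by name: the statement is the Claim_ definition above) =====
theorem domains_align_spec : Claim_equal_domains_align := by
  intro sd td _
  unfold Spec_domains_align domains_align domains_align_alt
  by_cases h0 : sd.toList.isEmpty || td.toList.isEmpty
  · simp [h0]
  · simp only [h0]
    rw [daNormalize_eq, daNormalize_eq]
    generalize (if PySem.Chars.startswith (PySem.Chars.strip (PySem.Chars.lower sd.toList)) "www.".toList
        then PySem.List.slice (PySem.Chars.strip (PySem.Chars.lower sd.toList)) (some 4) none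
        else PySem.Chars.strip (PySem.Chars.lower sd.toList)) = s
    generalize (if PySem.Chars.startswith (PySem.Chars.strip (PySem.Chars.lower td.toList)) "www.".toList
        then PySem.List.slice (PySem.Chars.strip (PySem.Chars.lower td.toList)) (some 4) none
        else PySem.Chars.strip (PySem.Chars.lower td.toList)) = t
    by_cases hst : s = t
    · simp [hst]
    · simp only [hst, if_false, beq_eq_false_iff_ne.mpr hst, Bool.false_or]
      by_cases hend : PySem.Chars.endswith t ('.' :: s)
      · simp [hend]
      · simp only [hend, Bool.false_or]
        exact daTail_eq s t hst
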